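-- pv_equiv track=rewrite | github.com/gka0903/Coding_Test | 2022.10.04/1이 될 때까지.py | solution
-- ===== SOURCE A (Python) =====
-- def solution(N, K):
--     count = 0
--     while N != 1:
--         if N % K == 0:
--             N //= K
--         else :
--             N -= 1
--         count += 1
--
--
--     return count
-- ===== SOURCE B (Python) =====
-- def solution(N, K):
--     # Recursive divide-and-count: for N < K only unit subtractions remain (N-1 steps);
--     # otherwise divmod batches the N % K subtractions and one division in O(1).
--     if N < K:
--         return N - 1
--     q, r = divmod(N, K)
--     return r + 1 + solution(q, K)
-- ===== Notes on version B (the rewrite author's own statement) =====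
-- stated objective: faster
-- what changed: Replaces the one-step-at-a-time while loop by a recursive divide-and-count: divmod batches all N%K unit subtractions plus one division per level, and the tail N<K is the closed form N-1.
-- outside the precondition, e.g. on solution(-30, -10): A returns 3, B returns -31; on solution(1, -5): A returns 0, B raises RecursionError
import Mathlib
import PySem

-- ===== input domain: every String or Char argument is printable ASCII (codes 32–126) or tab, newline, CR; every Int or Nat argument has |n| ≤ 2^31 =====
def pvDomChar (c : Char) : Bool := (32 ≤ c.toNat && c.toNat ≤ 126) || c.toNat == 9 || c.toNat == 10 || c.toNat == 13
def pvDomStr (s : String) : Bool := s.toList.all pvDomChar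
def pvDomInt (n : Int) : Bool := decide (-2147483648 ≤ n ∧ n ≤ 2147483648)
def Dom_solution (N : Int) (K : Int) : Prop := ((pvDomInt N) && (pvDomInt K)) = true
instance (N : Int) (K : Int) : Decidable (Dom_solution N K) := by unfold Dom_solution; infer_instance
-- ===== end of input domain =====

-- B replaces A's one-step-at-a-time loop by a recursive divide-and-count (divmod batches
-- the unit subtractions per level, closed form N-1 below K); equal on N ≥ 1, K ≥ 2.


-- needed above the ports: N // K < N for N ≥ 1, K ≥ 2 (termination of solution_alt)
theorem ediv_lt_self' (N K : Int) (hK : 2 ≤ K) (hN : 1 ≤ N) : N / K < N := by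
  have h0 : 0 ≤ N % K := Int.emod_nonneg N (by omega)
  have hdm : N % K + K * (N / K) = N := Int.emod_add_mul_ediv N K
  have hq : 0 ≤ N / K := Int.ediv_nonneg (by omega) (by omega)
  nlinarith

-- ===== PORT A =====
-- while N != 1: divide by K when divisible, else subtract 1, counting steps.
-- Fuel N.toNat only makes the recursion total; on Pre_ it is never exhausted
-- (each iteration strictly decreases N, which stays ≥ 1).
def solutionGoA (fuel : Nat) (N : Int) (K : Int) (count : Int) : Int :=
  match fuel with
  | 0 => count
  | f + 1 =>
    if N ≠ 1 then
      if PySem.Int.mod N K = 0 then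
        solutionGoA f (PySem.Int.floordiv N K) K (count + 1)
      else
        solutionGoA f (N - 1) K (count + 1)
    else count

def solution (N : Int) (K : Int) : Int := solutionGoA N.toNat N K 0

-- ===== PORT B =====
-- if N < K: return N - 1; else q, r = divmod(N, K); return r + 1 + solution(q, K).
-- divmod is ported as floordiv/mod (exact; Python's divmod raises only for K = 0,
-- which the recursion never reaches on Pre_). The 2 ≤ K guard only makes the
-- recursion total; Python B does not terminate there and Pre_ excludes it.
def solution_alt (N : Int) (K : Int) : Int :=
  if N < K then N - 1
  else if h : 2 ≤ K then
    PySem.Int.mod N K + 1 + solution_alt (PySem.Int.floordiv N K) K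
  else 0
termination_by N.toNat
decreasing_by
  rw [PySem.Int.floordiv_eq_ediv_of_pos (by omega)]
  have := ediv_lt_self' N K h (by omega)
  omega

-- ===== PRECONDITION & SPEC =====
-- Pre_ is the problem's natural domain (N ≥ 1, K ≥ 2). Outside it A either loops forever
-- (e.g. N ≤ 0 with K ≥ 2, or K ∈ {0,1}) or, for some negative K or N, happens to return a
-- value that is an accident of its step-by-step loop outside the problem's stated domain.
def Pre_solution (N : Int) (K : Int) : Prop := 1 ≤ N ∧ 2 ≤ K
instance (N : Int) (K : Int) : Decidable (Pre_solution N K) := by unfold Pre_solution; infer_instance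
def pvWitness_solution : Int × Int := (25, 3)
def Spec_solution (N : Int) (K : Int) (out : Int) : Prop := out = solution_alt N K
instance (N : Int) (K : Int) (out : Int) : Decidable (Spec_solution N K out) := by unfold Spec_solution; infer_instance

-- ===== CLAIM =====
def Claim_equal_solution : Prop := ∀ (N : Int) (K : Int), Dom_solution N K → Pre_solution N K → Spec_solution N K (solution N K)

-- ===== LEMMAS AND PROOFS =====

-- Reference step count, by well-founded recursion on N (one A-step per level).
def steps (N : Int) (K : Int) : Int :=
  if h : 2 ≤ K ∧ 2 ≤ N then
    if K ∣ N then 1 + steps (N / K) K else 1 + steps (N - 1) K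
  else 0
termination_by N.toNat
decreasing_by
  · have h1 : N / K < N := ediv_lt_self' N K (by omega) (by omega)
    omega
  · omega

theorem goA_eq_steps (f : Nat) (N K count : Int) (hK : 2 ≤ K) (hN : 1 ≤ N)
    (hf : N.toNat ≤ f) : solutionGoA f N K count = count + steps N K := by
  induction f generalizing N count with
  | zero => omega
  | succ f ih =>
    by_cases h1 : N = 1
    · subst h1
      rw [solutionGoA]
      simp only [ne_eq, not_true_eq_false, if_false]
      rw [steps, dif_neg (by omega)]
      ring
    · have hN2 : 2 ≤ N := by omega
      rw [solutionGoA]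
      simp only [ne_eq, h1, not_false_eq_true, if_true]
      rw [steps, dif_pos ⟨hK, hN2⟩]
      by_cases hd : K ∣ N
      · have hmod : PySem.Int.mod N K = 0 := (PySem.Int.mod_eq_zero_iff_dvd N K).mpr hd
        have hKN : K ≤ N := Int.le_of_dvd (by omega) hd
        have hq1 : 1 ≤ N / K := by
          rw [Int.le_ediv_iff_mul_le (by omega)]; omega
        have hqlt : N / K < N := ediv_lt_self' N K (by omega) (by omega)
        rw [if_pos hmod, if_pos hd,
            PySem.Int.floordiv_eq_ediv_of_pos (by omega),
            ih (N / K) (count + 1) hq1 (by omega)]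
        ring
      · have hmod : ¬ PySem.Int.mod N K = 0 := fun h => hd ((PySem.Int.mod_eq_zero_iff_dvd N K).mp h)
        rw [if_neg hmod, if_neg hd, ih (N - 1) (count + 1) (by omega) (by omega)]
        ring

-- For 1 ≤ N < K the loop only subtracts: steps = N - 1.
theorem steps_small (N K : Int) (hK : 2 ≤ K) (hN : 1 ≤ N) (hNK : N < K) :
    steps N K = N - 1 := by
  induction hn : N.toNat generalizing N with
  | zero => omega
  | succ n ih =>
    by_cases h1 : N = 1
    · subst h1; rw [steps]; simp
    · have hN2 : 2 ≤ N := by omega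
      have hnd : ¬ K ∣ N := by
        intro hd
        have := Int.le_of_dvd (by omega) hd
        omega
      rw [steps, dif_pos ⟨hK, hN2⟩, if_neg hnd, ih (N - 1) (by omega) (by omega) (by omega)]
      ring

-- For N ≥ K: N % K subtractions reach the multiple K * (N / K), then one division.
theorem steps_drop (N K : Int) (hK : 2 ≤ K) (hNK : K ≤ N) :
    steps N K = N % K + 1 + steps (N / K) K := by
  induction hn : N.toNat using Nat.strong_induction_on generalizing N with
  | _ n ih =>
    have hN2 : 2 ≤ N := by omega
    rw [steps, dif_pos ⟨hK, hN2⟩]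
    by_cases hd : K ∣ N
    · rw [if_pos hd, Int.emod_eq_zero_of_dvd hd]
      ring
    · have hr1 : 1 ≤ N % K := by
        have h0 : 0 ≤ N % K := Int.emod_nonneg N (by omega)
        rcases h0.lt_or_eq with h | h
        · omega
        · exact absurd (Int.dvd_of_emod_eq_zero h.symm) hd
      have hrK : N % K < K := Int.emod_lt_of_pos N (by omega)
      have hNgt : K < N := by
        rcases hNK.lt_or_eq with h | h
        · exact h
        · exact absurd ⟨1, by omega⟩ hd
      -- (N-1) / K = N / K and (N-1) % K = N % K - 1, since N % K ≥ 1
      have hdm : N % K + K * (N / K) = N := Int.emod_add_mul_ediv N K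
      have hq : (N - 1) / K = N / K ∧ (N - 1) % K = N % K - 1 := by
        constructor
        · conv_lhs => rw [show N - 1 = (N % K - 1) + K * (N / K) by omega]
          rw [Int.add_mul_ediv_left _ _ (show K ≠ 0 by omega),
              Int.ediv_eq_zero_of_lt (by omega) (by omega)]
          omega
        · conv_lhs => rw [show N - 1 = (N % K - 1) + K * (N / K) by omega]
          rw [Int.add_mul_emod_self_left, Int.emod_eq_of_lt (by omega) (by omega)]
      rw [if_neg hd, ih (N - 1).toNat (by omega) (N - 1) (by omega) rfl, hq.1, hq.2]
      ring

-- B's recursion computes steps: closed form below K, one steps_drop level above.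
theorem alt_eq_steps (N K : Int) (hK : 2 ≤ K) (hN : 1 ≤ N) :
    solution_alt N K = steps N K := by
  induction hn : N.toNat using Nat.strong_induction_on generalizing N with
  | _ n ih =>
    by_cases hNK : N < K
    · rw [solution_alt, if_pos hNK, steps_small N K hK hN hNK]
    · have hKN : K ≤ N := by omega
      have hq1 : 1 ≤ N / K := by
        rw [Int.le_ediv_iff_mul_le (by omega)]; omega
      have hqlt : N / K < N := ediv_lt_self' N K hK hN
      rw [solution_alt, if_neg hNK, dif_pos hK,
          PySem.Int.mod_eq_emod_of_pos (by omega),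
          PySem.Int.floordiv_eq_ediv_of_pos (by omega),
          ih (N / K).toNat (by omega) (N / K) hq1 rfl,
          steps_drop N K hK hKN]

-- ===== VERDICT =====
theorem solution_spec : Claim_equal_solution := by
  intro N K _ hpre
  unfold Spec_solution solution
  rw [goA_eq_steps N.toNat N K 0 hpre.2 hpre.1 (le_refl _),
      alt_eq_steps N K hpre.2 hpre.1]
  ring
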